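-- pv_equiv track=rewrite | github.com/Sahil-Atul-Raghuvanshi/raf_genai_icd_code_extraction | testing/test_prompt_outputs.py | find_common_and_different_codes
-- ===== SOURCE A (Python) =====
-- def find_common_and_different_codes(test_results):
--     """
--     Analyze test results to find common ICD codes and differences
--     test_results: list of ICD code lists from multiple test runs
--     Returns: (common_codes, different_codes_dict)
--     """
--     if not test_results or len(test_results) == 0:
--         return [], {}
--
--     # Filter out None and empty results
--     valid_results = [codes for codes in test_results if codes]
--
--     if not valid_results:
--         return [], {}
--
--     # Find codes that appear in ALL test runs
--     if len(valid_results) > 0: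
--         common_codes = set(valid_results[0])
--         for codes in valid_results[1:]:
--             common_codes = common_codes.intersection(set(codes))
--         common_codes = sorted(list(common_codes))
--     else:
--         common_codes = []
--
--     # Find codes unique to each test
--     different_codes = {}
--     for i, codes in enumerate(valid_results, 1):
--         unique_to_test = [code for code in codes if code not in common_codes]
--         if unique_to_test:
--             different_codes[f"test{i}"] = sorted(unique_to_test)
--
--     return common_codes, different_codes
-- ===== SOURCE B (Python) =====
-- def find_common_and_different_codes(test_results):
--     """
--     Analyze test results to find common ICD codes and differences.
--     One histogram pass over distinct codes per run + a threshold filter,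
--     instead of repeated set intersections.
--     """
--     valid_results = [codes for codes in test_results if codes]
--     if not valid_results:
--         return [], {}
--     n = len(valid_results)
--     counts = {}
--     for codes in valid_results:
--         for code in dict.fromkeys(codes):
--             counts[code] = counts.get(code, 0) + 1
--     common_codes = sorted(code for code in counts if counts[code] == n)
--     common_set = set(common_codes)
--     different_codes = {}
--     for i, codes in enumerate(valid_results, 1):
--         rest = [code for code in codes if code not in common_set]
--         if rest:
--             different_codes[f"test{i}"] = sorted(rest)
--     return common_codes, different_codes
-- ===== Notes on version B (the rewrite author's own statement) =====
-- stated objective: idiomatic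
-- what changed: B replaces A's iterated pairwise set-intersection loop with a single histogram pass (count each distinct code once per run, then keep codes whose count equals the number of valid runs) and a set for the subsequent membership test.
import Mathlib
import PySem

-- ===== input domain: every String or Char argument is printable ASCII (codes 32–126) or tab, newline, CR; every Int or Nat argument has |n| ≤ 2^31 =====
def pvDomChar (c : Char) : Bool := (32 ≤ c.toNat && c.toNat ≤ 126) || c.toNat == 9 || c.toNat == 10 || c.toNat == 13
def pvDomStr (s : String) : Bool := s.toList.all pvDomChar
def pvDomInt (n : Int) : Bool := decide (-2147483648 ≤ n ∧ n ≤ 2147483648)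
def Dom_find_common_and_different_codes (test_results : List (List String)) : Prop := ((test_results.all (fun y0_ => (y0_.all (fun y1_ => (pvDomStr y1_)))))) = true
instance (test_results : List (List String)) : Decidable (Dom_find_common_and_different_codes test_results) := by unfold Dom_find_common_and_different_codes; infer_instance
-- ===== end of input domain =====

-- B computes the common codes by one counting pass over distinct codes per run plus a
-- threshold filter, instead of A's iterated set intersections (objective: idiomatic).


-- ===== PORT A =====
def find_common_and_different_codes (test_results : List (List String)) : List String × (List (String × List String)) :=
  if test_results.isEmpty then ([], []) else
  let valid := test_results.filter (fun codes => !codes.isEmpty)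
  if valid.isEmpty then ([], []) else
  match valid with
  | [] => ([], [])   -- unreachable (valid nonempty); matches A's dead 'else common_codes = []' arm
  | v0 :: rest =>
    -- common_codes = set(valid[0]); for codes in valid[1:]: common_codes &= set(codes)
    let commonSet : PySem.Set String :=
      rest.foldl (fun acc codes => PySem.Set.inter acc (PySem.Set.ofList codes)) (PySem.Set.ofList v0)
    -- sorted(list(common_codes)) : sorted without key over a set, order-independent
    let common_codes := PySem.List.sorted commonSet (fun x => x) false
    let different := (PySem.List.enumerate valid 1).foldl
      (fun d p =>
        let unique := p.2.filter (fun code => !common_codes.contains code)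
        if unique.isEmpty then d
        else d.insert ("test" ++ PySem.Int.toStr p.1) (PySem.List.sorted unique (fun x => x) false))
      PySem.Dict.empty
    (common_codes, different.items)

-- ===== PORT B =====
def find_common_and_different_codes_alt (test_results : List (List String)) : List String × (List (String × List String)) :=
  let valid := test_results.filter (fun codes => !codes.isEmpty)
  if valid.isEmpty then ([], []) else
  let n := valid.length
  let counts : PySem.Dict String Int :=
    valid.foldl (fun d codes =>
      (PySem.List.dedup codes).foldl (fun d code => d.modify code 0 (· + 1)) d)
      PySem.Dict.empty
  -- 'for code in counts: ... counts[code]' — code is a key of counts, so counts[code] is exact as getD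
  let common_codes := PySem.List.sorted
    (counts.keys.filter (fun code => counts.getD code 0 == (n : Int))) (fun x => x) false
  let common_set := PySem.Set.ofList common_codes
  let different := (PySem.List.enumerate valid 1).foldl
    (fun d p =>
      let rest := p.2.filter (fun code => !common_set.contains code)
      if rest.isEmpty then d
      else d.insert ("test" ++ PySem.Int.toStr p.1) (PySem.List.sorted rest (fun x => x) false))
    PySem.Dict.empty
  (common_codes, different.items)

-- ===== PRECONDITION & SPEC =====
def Spec_find_common_and_different_codes (test_results : List (List String)) (out : List String × (List (String × List String))) : Prop := out = find_common_and_different_codes_alt test_results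
instance (test_results : List (List String)) (out : List String × (List (String × List String))) : Decidable (Spec_find_common_and_different_codes test_results out) := by unfold Spec_find_common_and_different_codes; infer_instance

-- ===== CLAIM (what is proved, stated in full; the proofs are below) =====
def Claim_equal_find_common_and_different_codes : Prop := ∀ (test_results : List (List String)), Dom_find_common_and_different_codes test_results → Spec_find_common_and_different_codes test_results (find_common_and_different_codes test_results)

-- ===== LEMMAS AND PROOFS =====

-- A's intersection fold: membership and nodup
theorem mem_foldl_inter (rest : List (List String)) (acc : List String) (x : String) :
    x ∈ rest.foldl (fun acc codes => PySem.Set.inter acc (PySem.Set.ofList codes)) acc ↔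
      x ∈ acc ∧ ∀ codes ∈ rest, x ∈ codes := by
  induction rest generalizing acc with
  | nil => simp
  | cons c cs ih =>
    simp [List.foldl_cons, ih, PySem.Set.mem_inter, PySem.Set.mem_ofList]
    tauto

theorem nodup_foldl_inter (rest : List (List String)) (acc : List String) (h : acc.Nodup) :
    (rest.foldl (fun acc codes => PySem.Set.inter acc (PySem.Set.ofList codes)) acc).Nodup := by
  induction rest generalizing acc with
  | nil => exact h
  | cons c cs ih => exact ih _ (PySem.Set.nodup_inter _ _ h)

-- flatten B's nested counting fold
theorem foldl_foldl_flatMap {α β γ : Type} (l : List α) (f : α → List β)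
    (g : γ → β → γ) (d : γ) :
    l.foldl (fun d a => (f a).foldl g d) d = (l.flatMap f).foldl g d := by
  induction l generalizing d with
  | nil => rfl
  | cons a as ih => simp [List.flatMap_cons, List.foldl_append, ih]

-- count of x in the flattened distinct-per-run list = number of runs containing x
theorem count_flatMap_dedup (valid : List (List String)) (x : String) :
    (valid.flatMap PySem.List.dedup).count x = valid.countP (fun codes => decide (x ∈ codes)) := by
  induction valid with
  | nil => rfl
  | cons c cs ih =>
    simp only [List.flatMap_cons, List.count_append, List.countP_cons, ih]
    by_cases hx : x ∈ c
    · rw [List.count_eq_one_of_mem (PySem.List.nodup_dedup c) ((PySem.List.mem_dedup c x).mpr hx)]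
      simp [hx]
      omega
    · rw [List.count_eq_zero.mpr (fun hm => hx ((PySem.List.mem_dedup c x).mp hm))]
      simp [hx]

-- ===== VERDICT (by name: the statement is the Claim_ definition above) =====
theorem find_common_and_different_codes_spec : Claim_equal_find_common_and_different_codes := by
  intro tr _
  unfold Spec_find_common_and_different_codes find_common_and_different_codes find_common_and_different_codes_alt
  by_cases htr : tr.isEmpty
  · -- tr = [] : both return ([], [])
    simp [List.isEmpty_iff.mp htr]
  · simp only [htr]
    set valid := tr.filter (fun codes => !codes.isEmpty) with hvalid
    by_cases hv : valid.isEmpty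
    · simp [hv]
    · simp only [hv]
      have hne : valid ≠ [] := fun h => hv (by simp [h])
      obtain ⟨v0, rest, hcons⟩ := List.exists_cons_of_ne_nil hne
      rw [hcons]
      -- names for the two candidate common lists (before sorting)
      set LA := rest.foldl (fun acc codes => PySem.Set.inter acc (PySem.Set.ofList codes))
        (PySem.Set.ofList v0) with hLA
      set counts : PySem.Dict String Int := (v0 :: rest).foldl (fun d codes =>
          (PySem.List.dedup codes).foldl (fun d code => d.modify code 0 (· + 1)) d)
          PySem.Dict.empty with hcounts
      set n := (v0 :: rest).length with hn
      set LB := counts.keys.filter (fun code => counts.getD code 0 == (n : Int)) with hLB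
      -- characterize counts
      have hflat : counts = ((v0 :: rest).flatMap PySem.List.dedup).foldl
          (fun d code => d.modify code 0 (· + 1)) PySem.Dict.empty := by
        rw [hcounts, foldl_foldl_flatMap]
      have hgetD : ∀ x, counts.getD x 0 =
          ((v0 :: rest).countP (fun codes => decide (x ∈ codes)) : Int) := by
        intro x
        rw [hflat, PySem.Dict.getD_foldl_modify_add_one, count_flatMap_dedup]
        simp
      have hkeys : counts.keys = PySem.Set.ofList ((v0 :: rest).flatMap PySem.List.dedup) := by
        rw [hflat, PySem.Dict.keys_foldl_modify]
        simp [PySem.Set.update_nil_left]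
      -- membership correspondence
      have hmem : ∀ x, x ∈ LA ↔ x ∈ LB := by
        intro x
        simp only [hLA, mem_foldl_inter, PySem.Set.mem_ofList, hLB, List.mem_filter]
        constructor
        · rintro ⟨hx0, hrest⟩
          have hall : ∀ codes ∈ (v0 :: rest), x ∈ codes := by
            intro c hc
            rcases List.mem_cons.mp hc with h | h
            · exact h ▸ hx0
            · exact hrest c h
          refine ⟨?_, ?_⟩
          · rw [hkeys]
            rw [PySem.Set.mem_ofList, List.mem_flatMap]
            exact ⟨v0, List.mem_cons_self .., (PySem.List.mem_dedup _ _).mpr hx0⟩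
          · rw [hgetD]
            have : (v0 :: rest).countP (fun codes => decide (x ∈ codes)) = n := by
              rw [hn]
              exact List.countP_eq_length.mpr (fun c hc => decide_eq_true (hall c hc))
            simp [this]
        · rintro ⟨hxk, hcnt⟩
          rw [hgetD] at hcnt
          have hcnt' : (v0 :: rest).countP (fun codes => decide (x ∈ codes)) = n := by
            have := of_decide_eq_true hcnt
            exact_mod_cast this
          have hall : ∀ codes ∈ (v0 :: rest), x ∈ codes := by
            have := List.countP_eq_length.mp (by rw [hcnt', hn])
            intro c hc
            exact of_decide_eq_true (this c hc)
          exact ⟨hall v0 (List.mem_cons_self ..), fun c hc => hall c (List.mem_cons.mpr (Or.inr hc))⟩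
      -- both nodup
      have hndA : LA.Nodup := nodup_foldl_inter _ _ (PySem.Set.nodup_ofList v0)
      have hndB : LB.Nodup := by
        rw [hLB]
        exact List.Nodup.filter _ (by rw [hkeys]; exact PySem.Set.nodup_ofList _)
      -- the sorted common lists coincide
      have hperm : LA.Perm LB := (List.perm_ext_iff_of_nodup hndA hndB).mpr hmem
      have hc : PySem.List.sorted LA (fun x => x) false = PySem.List.sorted LB (fun x => x) false :=
        PySem.List.sorted_eq_sorted_of_perm _ _ _ (fun a b h => h) hperm
      -- membership test: set(common) agrees with the list
      have hcontains : ∀ (l : List String) (c : String),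
          (PySem.Set.ofList l).contains c = l.contains c := by
        intro l c
        rw [Bool.eq_iff_iff]
        simp [PySem.Set.mem_ofList]
      simp only [hcontains, ← hLA, hc, Bool.false_eq_true, if_false]
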